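-- pv_equiv track=rewrite | github.com/SimonFans/LeetCode | OA/MS/Longest Substring Without 3 Contiguous Ocuurences of Letter.py | validLongestSubstring
-- ===== SOURCE A (Python) =====
-- def validLongestSubstring(s):
--     if len(s)<3:
--         return s
--     cur,start=0,0
--     end=1
--     c=s[0]
--     maxLen=1
--     count=1
--
--     while end < len(s):
--         if s[end]==c:
--             count+=1
--             if count==2:
--                 if end-cur+1 > maxLen:
--                     maxLen=end-cur+1
--                     start=cur
--             else:
--                 cur=end-1
--         else:
--             c=s[end]
--             count=1
--             if end-cur+1 > maxLen:
--                     maxLen=end-cur+1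
--                     start=cur
--         end+=1
--
--     return s[start:start+maxLen]
-- ===== SOURCE B (Python) =====
-- def validLongestSubstring(s):
--     n = len(s)
--     if n < 3:
--         return s
--     # indices where a third contiguous equal letter appears
--     triples = [i for i in range(2, n) if s[i] == s[i-1] == s[i-2]]
--     best_start = 0
--     best_len = triples[0] if triples else n
--     for k, t in enumerate(triples):
--         seg_end = triples[k+1] - 1 if k + 1 < len(triples) else n - 1
--         length = seg_end - (t - 1) + 1
--         if length > best_len:
--             best_start, best_len = t - 1, length
--     return s[best_start:best_start + best_len]
-- ===== Notes on version B (the rewrite author's own statement) =====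
-- stated objective: alternative
-- what changed: A's single branch-driven scan carrying (cur,start,c,maxLen,count) is replaced by a two-phase pass: first collect the indices where a third contiguous equal letter ends, then take the leftmost maximum over the resulting constant-start segments.
import Mathlib
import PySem

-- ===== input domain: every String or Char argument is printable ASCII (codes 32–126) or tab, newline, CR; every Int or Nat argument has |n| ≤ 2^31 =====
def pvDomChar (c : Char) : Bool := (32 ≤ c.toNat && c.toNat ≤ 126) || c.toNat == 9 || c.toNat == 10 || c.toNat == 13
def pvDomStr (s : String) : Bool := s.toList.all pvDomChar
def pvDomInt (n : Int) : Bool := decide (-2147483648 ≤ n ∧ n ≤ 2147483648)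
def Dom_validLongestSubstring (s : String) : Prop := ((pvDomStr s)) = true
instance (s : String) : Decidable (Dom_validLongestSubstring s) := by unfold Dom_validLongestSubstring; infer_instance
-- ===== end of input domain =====

-- B replaces A's branch-driven running-max scan by a two-phase pass: first collect the
-- triple-end indices, then take the max over the resulting constant-start segments
-- (objective: alternative decomposition, same cost).

-- ===== PORT A =====
-- state: (cur, start, c, maxLen, count); one step of A's while-loop body at index e
def stepA (l : List Char) (st : Nat × Nat × Char × Nat × Nat) (e : Nat) :
    Nat × Nat × Char × Nat × Nat :=
  match st with
  | (cur, start, c, maxLen, count) =>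
    if l.getD e default == c then
      let count := count + 1
      if count == 2 then
        if e - cur + 1 > maxLen then (cur, cur, c, e - cur + 1, count)
        else (cur, start, c, maxLen, count)
      else (e - 1, start, c, maxLen, count)
    else
      let c := l.getD e default
      if e - cur + 1 > maxLen then (cur, cur, c, e - cur + 1, 1)
      else (cur, start, c, maxLen, 1)

def validLongestSubstring (s : String) : String :=
  let l := s.toList
  if l.length < 3 then s
  else
    -- c = s[0] is in range since len(s) ≥ 3
    let st := (List.range' 1 (l.length - 1)).foldl (stepA l) (0, 0, l.getD 0 default, 1, 1)
    match st with
    | (_, start, _, maxLen, _) =>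
      String.mk (PySem.List.slice l (some (start : Int)) (some ((start + maxLen : Nat) : Int)))

-- ===== PORT B =====
-- s[i] == s[i-1] == s[i-2]; only applied at i ≥ 2 (range(2, n)), where getD is in range
def tripB (l : List Char) (i : Nat) : Bool :=
  l.getD i default == l.getD (i - 1) default && l.getD (i - 1) default == l.getD (i - 2) default

-- left-to-right scan of the constant-start segments, peeking at the next triple index
def segFoldB (n : Nat) : List Nat → Nat × Nat → Nat × Nat
  | [], bb => bb
  | t :: rest, (bs, bl) =>
    let segEnd := match rest with | t' :: _ => t' - 1 | [] => n - 1
    let length := segEnd - (t - 1) + 1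
    if length > bl then segFoldB n rest (t - 1, length)
    else segFoldB n rest (bs, bl)

def validLongestSubstring_alt (s : String) : String :=
  let l := s.toList
  let n := l.length
  if n < 3 then s
  else
    let triples := (List.range' 2 (n - 2)).filter (tripB l)
    let init : Nat × Nat := (0, match triples with | t :: _ => t | [] => n)
    match segFoldB n triples init with
    | (bs, bl) =>
      String.mk (PySem.List.slice l (some (bs : Int)) (some ((bs + bl : Nat) : Int)))

-- ===== PRECONDITION & SPEC =====
def Spec_validLongestSubstring (s : String) (out : String) : Prop := out = validLongestSubstring_alt s
instance (s : String) (out : String) : Decidable (Spec_validLongestSubstring s out) := by unfold Spec_validLongestSubstring; infer_instance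

-- ===== CLAIM (what is proved, stated in full; the proofs are below) =====
def Claim_equal_validLongestSubstring : Prop := ∀ (s : String), Dom_validLongestSubstring s → Spec_validLongestSubstring s (validLongestSubstring s)

-- ===== LEMMAS AND PROOFS =====

-- mid-level spec: "triple ends at i" (with the i ≥ 2 guard that B's range provides)
def trip3 (l : List Char) (i : Nat) : Bool := decide (2 ≤ i) && tripB l i

-- length of the maximal equal-char run ending at e
def runl (l : List Char) : Nat → Nat
  | 0 => 1
  | e + 1 => if l.getD (e + 1) default == l.getD e default then runl l e + 1 else 1

-- best-so-far update with a candidate window (start, len), strict '>' keeps the earliest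
def upd (b c : Nat × Nat) : Nat × Nat := if c.2 > b.2 then c else b

-- (cur, (bestStart, bestLen)) after A has processed positions 1..e
def bc (l : List Char) : Nat → Nat × Nat × Nat
  | 0 => (0, 0, 1)
  | e + 1 =>
    match bc l e with
    | (cur, bb) =>
      if trip3 l (e + 1) then (e, bb)
      else (cur, upd bb (cur, e + 1 - cur + 1))

theorem runl_pos (l : List Char) (e : Nat) : 1 ≤ runl l e := by
  cases e
  · simp [runl]
  · simp only [runl]; split <;> omega

theorem runl_ge_two (l : List Char) (e : Nat) :
    2 ≤ runl l e ↔ 1 ≤ e ∧ l.getD e default = l.getD (e - 1) default := by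
  cases e with
  | zero => simp [runl]
  | succ m =>
    simp only [runl, Nat.succ_sub_one]
    by_cases h : l.getD (m + 1) default = l.getD m default
    · rw [if_pos (beq_iff_eq.mpr h)]
      have := runl_pos l m
      exact ⟨fun _ => ⟨by omega, h⟩, fun _ => by omega⟩
    · rw [if_neg (fun hb => h (beq_iff_eq.mp hb))]
      exact ⟨fun h2 => by omega, fun h2 => absurd h2.2 h⟩

theorem trip3_succ (l : List Char) (e : Nat) :
    trip3 l (e + 1) =
      ((l.getD (e + 1) default == l.getD e default) && decide (3 ≤ runl l (e + 1))) := by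
  rw [Bool.eq_iff_iff]
  simp only [trip3, tripB, Nat.add_sub_cancel, Bool.and_eq_true, decide_eq_true_eq, beq_iff_eq]
  rw [show e + 1 - 2 = e - 1 from by omega]
  constructor
  · rintro ⟨h1, h2, h3⟩
    refine ⟨h2, ?_⟩
    have hrun : runl l (e + 1) = runl l e + 1 := by
      simp only [runl]; rw [if_pos (beq_iff_eq.mpr h2)]
    have := (runl_ge_two l e).mpr ⟨by omega, h3⟩
    omega
  · rintro ⟨h2, h3⟩
    have hrun : runl l (e + 1) = runl l e + 1 := by
      simp only [runl]; rw [if_pos (beq_iff_eq.mpr h2)]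
    have h4 := (runl_ge_two l e).mp (by omega)
    exact ⟨by omega, h2, h4.2⟩

-- unfolding lemmas (structure eta makes these definitional)
theorem bc_succ (l : List Char) (e : Nat) :
    bc l (e + 1) = if trip3 l (e + 1) then (e, (bc l e).2)
      else ((bc l e).1, upd (bc l e).2 ((bc l e).1, e + 1 - (bc l e).1 + 1)) := rfl

def nextEnd (n : Nat) : List Nat → Nat
  | [] => n - 1
  | t' :: _ => t' - 1

theorem segFoldB_cons (n t : Nat) (rest : List Nat) (bs bl : Nat) :
    segFoldB n (t :: rest) (bs, bl)
      = segFoldB n rest (upd (bs, bl) (t - 1, nextEnd n rest - (t - 1) + 1)) := by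
  cases rest with
  | nil =>
    show (if n - 1 - (t - 1) + 1 > bl then segFoldB n [] (t - 1, n - 1 - (t - 1) + 1)
          else segFoldB n [] (bs, bl))
        = segFoldB n []
            (if n - 1 - (t - 1) + 1 > bl then (t - 1, n - 1 - (t - 1) + 1) else (bs, bl))
    split_ifs <;> rfl
  | cons t' r =>
    show (if t' - 1 - (t - 1) + 1 > bl then segFoldB n (t' :: r) (t - 1, t' - 1 - (t - 1) + 1)
          else segFoldB n (t' :: r) (bs, bl))
        = segFoldB n (t' :: r)
            (if t' - 1 - (t - 1) + 1 > bl then (t - 1, t' - 1 - (t - 1) + 1) else (bs, bl))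
    split_ifs <;> rfl

-- A's loop step realises one step of bc
theorem stepA_bc (l : List Char) (e : Nat) :
    stepA l ((bc l e).1, (bc l e).2.1, l.getD e default, (bc l e).2.2, runl l e) (e + 1)
      = ((bc l (e + 1)).1, (bc l (e + 1)).2.1, l.getD (e + 1) default,
         (bc l (e + 1)).2.2, runl l (e + 1)) := by
  by_cases hc : l.getD (e + 1) default = l.getD e default
  · have hb : (l.getD (e + 1) default == l.getD e default) = true := beq_iff_eq.mpr hc
    have hrun : runl l (e + 1) = runl l e + 1 := by
      simp only [runl]; rw [if_pos hb]
    by_cases h2 : runl l e = 1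
    · have htrip : trip3 l (e + 1) = false := by
        rw [trip3_succ, hrun, h2, decide_eq_false (by omega), Bool.and_false]
      have hbc : bc l (e + 1)
          = ((bc l e).1, upd (bc l e).2 ((bc l e).1, e + 1 - (bc l e).1 + 1)) := by
        rw [bc_succ, if_neg (by rw [htrip]; exact Bool.false_ne_true)]
      have hcnt : (runl l e + 1 == 2) = true := by rw [h2]; decide
      simp only [stepA]
      rw [if_pos hb, if_pos hcnt, hbc, hrun, hc]
      simp only [upd]
      by_cases hm : e + 1 - (bc l e).1 + 1 > (bc l e).2.2
      · rw [if_pos hm, if_pos hm]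
      · rw [if_neg hm, if_neg hm]
    · have htrip : trip3 l (e + 1) = true := by
        rw [trip3_succ, hrun, hb, Bool.true_and]
        exact decide_eq_true (by have := runl_pos l e; omega)
      have hbc : bc l (e + 1) = (e, (bc l e).2) := by
        rw [bc_succ, if_pos (by rw [htrip])]
      have hcnt : (runl l e + 1 == 2) = false := beq_eq_false_iff_ne.mpr (by omega)
      simp only [stepA]
      rw [if_pos hb, if_neg (by rw [hcnt]; exact Bool.false_ne_true), hbc, hrun, hc]
      rfl
  · have hb : (l.getD (e + 1) default == l.getD e default) = false :=
      beq_eq_false_iff_ne.mpr hc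
    have hrun : runl l (e + 1) = 1 := by
      simp only [runl]; rw [if_neg (by rw [hb]; exact Bool.false_ne_true)]
    have htrip : trip3 l (e + 1) = false := by
      rw [trip3_succ, hb, Bool.false_and]
    have hbc : bc l (e + 1)
        = ((bc l e).1, upd (bc l e).2 ((bc l e).1, e + 1 - (bc l e).1 + 1)) := by
      rw [bc_succ, if_neg (by rw [htrip]; exact Bool.false_ne_true)]
    simp only [stepA]
    rw [if_neg (by rw [hb]; exact Bool.false_ne_true), hbc, hrun]
    simp only [upd]
    by_cases hm : e + 1 - (bc l e).1 + 1 > (bc l e).2.2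
    · rw [if_pos hm, if_pos hm]
    · rw [if_neg hm, if_neg hm]

theorem foldA_bc (l : List Char) (e : Nat) :
    (List.range' 1 e).foldl (stepA l) (0, 0, l.getD 0 default, 1, 1)
      = ((bc l e).1, (bc l e).2.1, l.getD e default, (bc l e).2.2, runl l e) := by
  induction e with
  | zero => simp [bc, runl]
  | succ m ih =>
    rw [List.range'_concat, List.foldl_append, ih, List.foldl_cons, List.foldl_nil,
        show 1 + 1 * m = m + 1 from by omega, stepA_bc]

-- upd facts
theorem upd_blen_le (b c : Nat × Nat) : b.2 ≤ (upd b c).2 := by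
  simp only [upd]; split <;> omega

theorem upd_noop (b c : Nat × Nat) (h : c.2 ≤ b.2) : upd b c = b := by
  simp only [upd]; rw [if_neg (by omega)]

theorem upd_collapse (b : Nat × Nat) (s n1 n2 : Nat) (h : n1 ≤ n2) :
    upd (upd b (s, n1)) (s, n2) = upd b (s, n2) := by
  rcases b with ⟨bs, bl⟩
  simp only [upd]
  split_ifs <;>
    first
      | rfl
      | omega
      | (exact congrArg (Prod.mk s) (by omega))

-- across a triple-free stretch, cur is constant and best collapses to the last candidate
theorem bc_seg (l : List Char) (a : Nat) :
    ∀ d, (∀ i, a < i → i ≤ a + d → trip3 l i = false) →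
      (bc l (a + d)).1 = (bc l a).1 ∧
      (bc l (a + d)).2 =
        (if d = 0 then (bc l a).2
         else upd (bc l a).2 ((bc l a).1, a + d - (bc l a).1 + 1)) := by
  intro d
  induction d with
  | zero => simp
  | succ m ih =>
    intro h
    have hm := ih (fun i h1 h2 => h i h1 (by omega))
    have htrip : trip3 l (a + m + 1) = false := h (a + m + 1) (by omega) (by omega)
    have hstep := bc_succ l (a + m)
    rw [show a + (m + 1) = (a + m) + 1 from by omega, hstep, if_neg (by rw [htrip]; exact Bool.false_ne_true)]
    refine ⟨hm.1, ?_⟩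
    simp only [hm.1, hm.2]
    by_cases hm0 : m = 0
    · simp [hm0]
    · rw [if_neg hm0, if_neg (show ¬ (m + 1 = 0) from by omega)]
      rw [show a + m + 1 - (bc l a).1 + 1 = a + (m + 1) - (bc l a).1 + 1 from by omega]
      exact upd_collapse _ _ _ _ (by omega)

theorem bc_trip (l : List Char) (t : Nat) (h1 : 1 ≤ t) (h : trip3 l t = true) :
    bc l t = (t - 1, (bc l (t - 1)).2) := by
  obtain ⟨e, rfl⟩ : ∃ e, t = e + 1 := ⟨t - 1, by omega⟩
  rw [bc_succ, if_pos (by rw [h])]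
  simp

theorem bc_blen_mono (l : List Char) (e : Nat) : (bc l e).2.2 ≤ (bc l (e + 1)).2.2 := by
  rw [bc_succ]
  split
  · rfl
  · exact upd_blen_le _ _

theorem bc_blen_two (l : List Char) (e : Nat) (h : 1 ≤ e) : 2 ≤ (bc l e).2.2 := by
  induction e with
  | zero => omega
  | succ m ih =>
    by_cases hm : 1 ≤ m
    · exact le_trans (ih hm) (bc_blen_mono l m)
    · have : m = 0 := by omega
      subst this
      have htrip : trip3 l 1 = false := by simp [trip3]
      rw [bc_succ, if_neg (by rw [htrip]; exact Bool.false_ne_true)]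
      simp [bc, upd]

-- segFoldB over the complete, sorted list of remaining triples computes bc's best
theorem segFold_bc (l : List Char) (n : Nat) (hn : 3 ≤ n) :
    ∀ (ts : List Nat) (t : Nat), trip3 l t = true → 2 ≤ t → t < n →
      (∀ i, t < i → i < n → (trip3 l i = true ↔ i ∈ ts)) →
      ts.Pairwise (· < ·) → (∀ i ∈ ts, t < i ∧ i < n) →
      segFoldB n (t :: ts) (bc l (t - 1)).2 = (bc l (n - 1)).2 := by
  intro ts
  induction ts with
  | nil =>
    intro t htr ht2 htn hcomp _ _
    have hseg := bc_seg l t (n - 1 - t) (by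
      intro i h1 h2
      by_contra hcon
      simp only [Bool.not_eq_false] at hcon
      exact absurd ((hcomp i h1 (by omega)).mp hcon) (List.not_mem_nil))
    rw [show t + (n - 1 - t) = n - 1 from by omega] at hseg
    rw [bc_trip l t (by omega) htr] at hseg
    simp only at hseg
    rw [segFoldB_cons]
    show upd (bc l (t - 1)).2 (t - 1, nextEnd n [] - (t - 1) + 1) = _
    by_cases hd : n - 1 - t = 0
    · rw [hseg.2, if_pos hd]
      exact upd_noop _ _ (by
        show nextEnd n [] - (t - 1) + 1 ≤ _
        have : nextEnd n [] = n - 1 := rfl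
        rw [this, show n - 1 - (t - 1) + 1 = 2 from by omega]
        exact bc_blen_two l (t - 1) (by omega))
    · rw [hseg.2, if_neg hd]
      exact congrArg (fun x => upd (bc l (t - 1)).2 (t - 1, x - (t - 1) + 1)) rfl
  | cons t' rest ih =>
    intro t htr ht2 htn hcomp hpair hbnd
    have ht' := hbnd t' (by simp)
    have htr' : trip3 l t' = true := (hcomp t' ht'.1 ht'.2).mpr (by simp)
    have hrest : ∀ i ∈ rest, t' < i ∧ i < n := by
      intro i hi
      exact ⟨(List.pairwise_cons.mp hpair).1 i hi, (hbnd i (by simp [hi])).2⟩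
    have hfree : ∀ i, t < i → i ≤ t + (t' - 1 - t) → trip3 l i = false := by
      intro i h1 h2
      by_contra hcon
      simp only [Bool.not_eq_false] at hcon
      rcases List.mem_cons.mp ((hcomp i h1 (by omega)).mp hcon) with h | h
      · omega
      · have := (hrest i h).1; omega
    have hseg := bc_seg l t (t' - 1 - t) hfree
    rw [show t + (t' - 1 - t) = t' - 1 from by omega] at hseg
    rw [bc_trip l t (by omega) htr] at hseg
    simp only at hseg
    have hkey : upd (bc l (t - 1)).2 (t - 1, t' - 1 - (t - 1) + 1) = (bc l (t' - 1)).2 := by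
      by_cases hd : t' - 1 - t = 0
      · rw [hseg.2, if_pos hd]
        exact upd_noop _ _ (by
          show t' - 1 - (t - 1) + 1 ≤ _
          rw [show t' - 1 - (t - 1) + 1 = 2 from by omega]
          exact bc_blen_two l (t - 1) (by omega))
      · rw [hseg.2, if_neg hd]
    rw [segFoldB_cons]
    rw [show nextEnd n (t' :: rest) = t' - 1 from rfl, hkey]
    exact ih t' htr' (by omega) ht'.2
      (by
        intro i h1 h2
        rw [hcomp i (by omega) h2]
        constructor
        · intro hmem
          rcases List.mem_cons.mp hmem with h | h
          · omega
          · exact h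
        · intro h; exact List.mem_cons_of_mem _ h)
      (List.pairwise_cons.mp hpair).2 hrest

-- membership in B's filtered range is exactly trip3 below n
theorem mem_triples (l : List Char) (n : Nat) (hn : 3 ≤ n) (i : Nat) :
    i ∈ (List.range' 2 (n - 2)).filter (tripB l) ↔ (trip3 l i = true ∧ i < n) := by
  rw [List.mem_filter, List.mem_range'_1]
  simp only [trip3, Bool.and_eq_true, decide_eq_true_eq]
  constructor
  · rintro ⟨⟨h1, h2⟩, h3⟩
    exact ⟨⟨h1, h3⟩, by omega⟩
  · rintro ⟨⟨h1, h2⟩, h3⟩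
    exact ⟨⟨h1, by omega⟩, h2⟩

theorem triples_sorted (l : List Char) (n : Nat) :
    ((List.range' 2 (n - 2)).filter (tripB l)).Pairwise (· < ·) :=
  (List.pairwise_lt_range' ..).filter _

-- the core equality of the two best-window computations
theorem main_eq (l : List Char) (hn : 3 ≤ l.length) :
    segFoldB l.length ((List.range' 2 (l.length - 2)).filter (tripB l))
      (0, match (List.range' 2 (l.length - 2)).filter (tripB l) with
          | t :: _ => t | [] => l.length)
      = (bc l (l.length - 1)).2 := by
  set n := l.length with hnn
  cases htl : (List.range' 2 (n - 2)).filter (tripB l) with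
  | nil =>
    have hfree : ∀ i, 0 < i → i ≤ 0 + (n - 1) → trip3 l i = false := by
      intro i h1 h2
      by_contra hcon
      simp only [Bool.not_eq_false] at hcon
      by_cases hi : i < n
      · have := (mem_triples l n hn i).mpr ⟨hcon, hi⟩
        rw [htl] at this; exact absurd this (List.not_mem_nil)
      · simp only [trip3, Bool.and_eq_true, decide_eq_true_eq] at hcon
        omega
    have hseg := bc_seg l 0 (n - 1) hfree
    simp only [Nat.zero_add] at hseg
    show (0, n) = (bc l (n - 1)).2
    rw [hseg.2, if_neg (show ¬ (n - 1 = 0) from by omega),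
        show bc l 0 = (0, 0, 1) from rfl]
    show (0, n) = upd (0, 1) (0, n - 1 - 0 + 1)
    rw [show upd (0, 1) (0, n - 1 - 0 + 1) = (0, n - 1 - 0 + 1) from
          if_pos (show n - 1 - 0 + 1 > 1 from by omega)]
    exact congrArg (Prod.mk 0) (by omega)
  | cons t ts =>
    have hmem : ∀ i, i ∈ t :: ts ↔ (trip3 l i = true ∧ i < n) := by
      intro i; rw [← htl]; exact mem_triples l n hn i
    have hpair : (t :: ts).Pairwise (· < ·) := by rw [← htl]; exact triples_sorted l n
    have ht := (hmem t).mp (by simp)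
    have ht2 : 2 ≤ t := by
      have := ht.1; simp only [trip3, Bool.and_eq_true, decide_eq_true_eq] at this
      exact this.1
    have hfree : ∀ i, 0 < i → i ≤ 0 + (t - 1) → trip3 l i = false := by
      intro i h1 h2
      by_contra hcon
      simp only [Bool.not_eq_false] at hcon
      rcases List.mem_cons.mp ((hmem i).mpr ⟨hcon, by omega⟩) with h | h
      · omega
      · have := (List.pairwise_cons.mp hpair).1 i h; omega
    have hseg := bc_seg l 0 (t - 1) hfree
    simp only [Nat.zero_add] at hseg
    have hbct : (bc l (t - 1)).2 = (0, t) := by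
      rw [hseg.2, if_neg (show ¬ (t - 1 = 0) from by omega),
          show bc l 0 = (0, 0, 1) from rfl]
      show upd (0, 1) (0, t - 1 - 0 + 1) = (0, t)
      rw [show upd (0, 1) (0, t - 1 - 0 + 1) = (0, t - 1 - 0 + 1) from
            if_pos (show t - 1 - 0 + 1 > 1 from by omega)]
      exact congrArg (Prod.mk 0) (by omega)
    rw [← hbct]
    exact segFold_bc l n hn ts t ht.1 ht2 ht.2
      (by intro i h1 h2
          constructor
          · intro h3
            rcases List.mem_cons.mp ((hmem i).mpr ⟨h3, h2⟩) with h | h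
            · omega
            · exact h
          · intro h3
            exact ((hmem i).mp (List.mem_cons_of_mem _ h3)).1)
      (List.pairwise_cons.mp hpair).2
      (by intro i hi
          exact ⟨(List.pairwise_cons.mp hpair).1 i hi,
                 ((hmem i).mp (List.mem_cons_of_mem _ hi)).2⟩)

-- ===== VERDICT (by name: the statement is the Claim_ definition above) =====
theorem validLongestSubstring_spec : Claim_equal_validLongestSubstring := by
  intro s _
  unfold Spec_validLongestSubstring
  show validLongestSubstring s = validLongestSubstring_alt s
  unfold validLongestSubstring validLongestSubstring_alt
  by_cases h : s.toList.length < 3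
  · rw [if_pos h, if_pos h]
  · rw [if_neg h, if_neg h]
    have hn : 3 ≤ s.toList.length := by omega
    rw [foldA_bc s.toList (s.toList.length - 1)]
    have hB := main_eq s.toList hn
    exact (congrArg (fun p : Nat × Nat =>
      String.mk (PySem.List.slice s.toList (some (p.1 : Int))
        (some ((p.1 + p.2 : Nat) : Int)))) hB).symm
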